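-- pv_equiv track=rewrite | github.com/rupasreeyeduru/INTRO-TO-NLP | Language_Modelling/smoothing.py | calc_sum_fre
-- ===== SOURCE A (Python) =====
-- def calc_sum_fre(dic,n):
--     sum_fre={}
--     for i in range(2,n+1):
--         d={}
--         for keys,vals in dic[i].items():
--             his=keys.rsplit(' ',1)[0]
--             if d.get(his,0)==0:
--                 d[his]=vals
--             else:
--                 d[his]+=vals
--         sum_fre[i]=d
--     return sum_fre
-- ===== SOURCE B (Python) =====
-- def calc_sum_fre(dic, n):
--     # Per level: tag each ngram with its history prefix, deduplicate the
--     # prefixes in first-occurrence order and total each one with a filtered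
--     # sum; the result is built directly as a comprehension over the levels
--     # (skipping a level absent from dic instead of raising KeyError).
--     def level(items):
--         pairs = [(k.rsplit(' ', 1)[0], v) for k, v in items]
--         return {h: sum(v for p, v in pairs if p == h)
--                 for h in dict.fromkeys(p for p, _ in pairs)}
--     return {i: level(dic[i].items()) for i in range(2, n + 1) if i in dic}
-- ===== Notes on version B (the rewrite author's own statement) =====
-- stated objective: alternative
-- what changed: B replaces A's mutable running-total dict (zero-test branch, accumulate-in-place) by a declarative two-pass per level -- dedup the history prefixes in first-occurrence order and compute each prefix's total with a filtered sum -- and builds the outer result as a single comprehension over the levels instead of a fold inserting into a dict.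
import Mathlib
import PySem

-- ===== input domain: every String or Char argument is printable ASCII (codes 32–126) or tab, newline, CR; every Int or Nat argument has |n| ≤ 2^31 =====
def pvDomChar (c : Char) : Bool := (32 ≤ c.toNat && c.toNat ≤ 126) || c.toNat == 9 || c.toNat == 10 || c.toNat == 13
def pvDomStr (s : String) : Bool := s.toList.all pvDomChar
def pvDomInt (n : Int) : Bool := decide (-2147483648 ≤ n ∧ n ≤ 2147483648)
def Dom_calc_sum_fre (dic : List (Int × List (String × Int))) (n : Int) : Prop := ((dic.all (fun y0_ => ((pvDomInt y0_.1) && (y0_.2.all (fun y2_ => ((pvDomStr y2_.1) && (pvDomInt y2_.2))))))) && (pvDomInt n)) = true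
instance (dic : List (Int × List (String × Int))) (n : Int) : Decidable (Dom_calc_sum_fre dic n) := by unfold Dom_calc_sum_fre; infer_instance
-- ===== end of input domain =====

-- B builds each level by prefix-dedup + filtered sums (no running-total dict) and the outer
-- result as one comprehension over the levels (skipping a level missing from dic, where A raises).
-- ===== PORT A =====
-- keys.rsplit(' ', 1)[0] : everything before the LAST space, or the whole string if it has no space
-- (hand port, exact for sep = ' ' and maxsplit = 1: rsplit(' ',1) = [prefix-before-last-space, rest] or [s])
def histChars (cs : List Char) : List Char :=
  if ' ' ∈ cs then ((cs.reverse.dropWhile (fun c => c ≠ ' ')).tail).reverse else cs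

def hist (s : String) : String := String.ofList (histChars s.toList)

def calc_sum_fre (dic : List (Int × List (String × Int))) (n : Int) : List (Int × List (String × Int)) :=
  ((PySem.List.pyRange 2 (n + 1) 1).foldl (fun sf i =>
      match (PySem.Dict.mk dic).get? i with
      | none => sf  -- Python raises KeyError here; excluded by Pre_
      | some lvl =>
        let d := lvl.foldl (fun d kv =>
            let his := hist kv.1
            if d.getD his 0 == 0 then d.insert his kv.2
            else d.insert his (d.getD his 0 + kv.2))
          PySem.Dict.empty
        sf.insert i d.items)
    PySem.Dict.empty).items

-- ===== PORT B =====
-- one comprehension over the levels: '{i: level(dic[i].items()) for i in range(2, n+1) if i in dic}'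
-- (the comprehension's keys i are distinct, so the dict it builds IS the list of its pairs in order)
def calc_sum_fre_alt (dic : List (Int × List (String × Int))) (n : Int) : List (Int × List (String × Int)) :=
  (PySem.List.pyRange 2 (n + 1) 1).filterMap (fun i =>
    ((PySem.Dict.mk dic).get? i).map (fun lvl =>
      let pairs := lvl.map (fun kv => (hist kv.1, kv.2))
      (i, (PySem.List.dedup (pairs.map (·.1))).map
            (fun h => (h, ((pairs.filter (fun p => p.1 == h)).map (·.2)).sum)))))

-- ===== PRECONDITION & SPEC =====
-- Pre_: every level 2..n is a key of dic (Python A raises KeyError otherwise); stated as a count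
-- over dic's distinct keys (the n-1 integers of [2, n] are all present iff exactly n-1 distinct keys lie in [2, n])
def Pre_calc_sum_fre (dic : List (Int × List (String × Int))) (n : Int) : Prop :=
  n < 2 ∨ (PySem.Set.ofList (dic.map Prod.fst)).countP (fun k => decide (2 ≤ k ∧ k ≤ n)) = (n - 1).toNat
instance (dic : List (Int × List (String × Int))) (n : Int) : Decidable (Pre_calc_sum_fre dic n) := by
  unfold Pre_calc_sum_fre; infer_instance
def pvWitness_calc_sum_fre : (List (Int × List (String × Int))) × Int := ([(2, [("a b", 1), ("a c", 2)])], 2)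
def Spec_calc_sum_fre (dic : List (Int × List (String × Int))) (n : Int) (out : List (Int × List (String × Int))) : Prop := out = calc_sum_fre_alt dic n
instance (dic : List (Int × List (String × Int))) (n : Int) (out : List (Int × List (String × Int))) : Decidable (Spec_calc_sum_fre dic n out) := by unfold Spec_calc_sum_fre; infer_instance

-- ===== CLAIM (what is proved, stated in full; the proofs are below) =====
def Claim_equal_calc_sum_fre : Prop := ∀ (dic : List (Int × List (String × Int))) (n : Int), Dom_calc_sum_fre dic n → Pre_calc_sum_fre dic n → Spec_calc_sum_fre dic n (calc_sum_fre dic n)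

-- ===== LEMMAS AND PROOFS =====

-- A's zero-test branch always stores the running total plus the value (overwriting 0 is adding to 0)
theorem stepA_eq (d : PySem.Dict String Int) (kv : String × Int) :
    (if d.getD (hist kv.1) 0 == 0 then d.insert (hist kv.1) kv.2
     else d.insert (hist kv.1) (d.getD (hist kv.1) 0 + kv.2))
    = d.insert (hist kv.1) (d.getD (hist kv.1) 0 + kv.2) := by
  split
  · rename_i h
    have h0 : d.getD (hist kv.1) 0 = 0 := by simpa using h
    rw [h0]; norm_num
  · rfl

-- the running total at key k after A's loop is the sum of the values whose history is k
theorem getD_foldA (l : List (String × Int)) (d : PySem.Dict String Int) (k : String) :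
    (l.foldl (fun d kv => d.insert (hist kv.1) (d.getD (hist kv.1) 0 + kv.2)) d).getD k 0
    = d.getD k 0 + ((l.filter (fun kv => hist kv.1 == k)).map (·.2)).sum := by
  induction l generalizing d with
  | nil => simp
  | cons kv rest ih =>
    simp only [List.foldl_cons, ih, List.filter_cons]
    rw [PySem.Dict.getD_insert]
    by_cases hk : hist kv.1 = k
    · simp [hk]; ring
    · simp [hk, Ne.symm hk]

-- a dict with distinct keys is the list of its keys paired with their values
theorem items_eq_keys_map (d : PySem.Dict String Int) (h : d.keys.Nodup) :
    d.items = d.keys.map (fun k => (k, d.getD k 0)) := by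
  simp only [PySem.Dict.keys, List.map_map]
  conv_lhs => rw [show d.items = d.items.map id from (List.map_id _).symm]
  apply List.map_congr_left
  intro p hp
  have hmem : (p.1, p.2) ∈ d.items := by simpa using hp
  have := PySem.Dict.getD_of_mem_items d hmem h 0
  simp [Function.comp, this]

-- per level: A's accumulation dict, as a list, is B's dedup-and-sum list
theorem inner_eq (lvl : List (String × Int)) :
    (lvl.foldl (fun d kv =>
        let his := hist kv.1
        if d.getD his 0 == 0 then d.insert his kv.2
        else d.insert his (d.getD his 0 + kv.2))
      PySem.Dict.empty).items
    = (PySem.List.dedup ((lvl.map (fun kv => (hist kv.1, kv.2))).map (·.1))).map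
        (fun h => (h, (((lvl.map (fun kv => (hist kv.1, kv.2))).filter (fun p => p.1 == h)).map (·.2)).sum)) := by
  have hfun : (fun (d : PySem.Dict String Int) (kv : String × Int) =>
      let his := hist kv.1
      if d.getD his 0 == 0 then d.insert his kv.2
      else d.insert his (d.getD his 0 + kv.2))
    = fun d kv => d.insert (hist kv.1) (d.getD (hist kv.1) 0 + kv.2) := by
    funext d kv; exact stepA_eq d kv
  rw [hfun]
  set F := fun (d : PySem.Dict String Int) (kv : String × Int) =>
    d.insert (hist kv.1) (d.getD (hist kv.1) 0 + kv.2) with hF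
  have hnodup : (lvl.foldl F PySem.Dict.empty).keys.Nodup := by
    rw [hF]
    exact PySem.Dict.nodup_keys_foldl_insert_key lvl (fun kv => hist kv.1)
      (fun d kv => d.getD (hist kv.1) 0 + kv.2) PySem.Dict.empty (by simp [PySem.Dict.keys_empty])
  have hkeys : (lvl.foldl F PySem.Dict.empty).keys
      = PySem.Set.update ([] : List String) (lvl.map (fun kv => hist kv.1)) := by
    rw [hF]
    have := PySem.Dict.keys_foldl_insert_key (ν := Int) lvl (fun kv => hist kv.1)
      (fun d kv => d.getD (hist kv.1) 0 + kv.2) PySem.Dict.empty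
    simpa [PySem.Dict.keys_empty] using this
  rw [items_eq_keys_map _ hnodup, hkeys]
  have hsetlist : PySem.Set.update ([] : List String) (lvl.map (fun kv => hist kv.1))
      = PySem.List.dedup ((lvl.map (fun kv => (hist kv.1, kv.2))).map (·.1)) := by
    simp [PySem.Set.update, PySem.Set.ofList, PySem.List.dedup_eq_ofList,
      List.map_map, Function.comp_def]
  rw [hsetlist]
  apply List.map_congr_left
  intro h hh
  have : ((lvl.map (fun kv => (hist kv.1, kv.2))).filter (fun p => p.1 == h)).map (·.2)
      = (lvl.filter (fun kv => hist kv.1 == h)).map (·.2) := by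
    rw [List.filter_map, List.map_map]
    simp [Function.comp_def]
  rw [this, hF]
  simp only [getD_foldA, PySem.Dict.getD_empty, zero_add]

-- the outer fold: inserting (i, f lvl) for each present level i (distinct, fresh keys) appends,
-- so the resulting items are exactly the filterMap of B's comprehension
theorem items_foldl_opt {V : Type} (g : Int → Option (List (String × Int)))
    (f : List (String × Int) → V)
    (l : List Int) (d : PySem.Dict Int V)
    (hfresh : ∀ i ∈ l, d.contains i = false) (hnd : l.Nodup) :
    (l.foldl (fun sf i =>
        match g i with
        | none => sf
        | some lvl => sf.insert i (f lvl)) d).items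
    = d.items ++ l.filterMap (fun i => (g i).map (fun lvl => (i, f lvl))) := by
  induction l generalizing d with
  | nil => simp
  | cons i rest ih =>
    simp only [List.foldl_cons, List.filterMap_cons]
    cases hg : g i with
    | none =>
      exact ih d (fun j hj => hfresh j (List.mem_cons_of_mem _ hj)) hnd.of_cons
    | some lvl =>
      simp only [Option.map_some]
      have hdi : d.contains i = false := hfresh i (List.mem_cons_self)
      have hfresh' : ∀ j ∈ rest, (d.insert i (f lvl)).contains j = false := by
        intro j hj
        rw [PySem.Dict.contains_insert]
        have hji : j ≠ i := fun h => (List.nodup_cons.mp hnd).1 (h ▸ hj)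
        simp [hji, hfresh j (List.mem_cons_of_mem _ hj)]
      rw [ih (d.insert i (f lvl)) hfresh' hnd.of_cons,
        PySem.Dict.items_insert_of_not_contains _ _ hdi]
      simp

-- ===== VERDICT (by name: the statement is the Claim_ definition above) =====
theorem calc_sum_fre_spec : Claim_equal_calc_sum_fre := by
  intro dic n _ _
  unfold Spec_calc_sum_fre calc_sum_fre calc_sum_fre_alt
  rw [items_foldl_opt (fun i => (PySem.Dict.mk dic).get? i)
      (fun lvl => (lvl.foldl (fun d kv =>
          let his := hist kv.1
          if d.getD his 0 == 0 then d.insert his kv.2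
          else d.insert his (d.getD his 0 + kv.2)) PySem.Dict.empty).items)
      (PySem.List.pyRange 2 (n + 1) 1) PySem.Dict.empty
      (by intro i _; simp [PySem.Dict.contains, PySem.Dict.empty])
      (PySem.List.nodup_pyRange_one 2 (n + 1))]
  have hdemp : (PySem.Dict.empty : PySem.Dict Int (List (String × Int))).items = [] := rfl
  rw [hdemp, List.nil_append]
  apply List.filterMap_congr
  intro i _
  cases hget : (PySem.Dict.mk dic).get? i with
  | none => rfl
  | some lvl => simp only [Option.map_some, inner_eq]
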